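-- pv_equiv track=rewrite | github.com/pavel-zhur/ai-db | ai-frontend/src/ai_frontend/compiler.py | _extract_typescript_errors
-- ===== SOURCE A (Python) =====
-- def _extract_typescript_errors(output: str) -> str:
--     """Extract meaningful TypeScript errors from compiler output."""
--     lines = output.split("\n")
--     error_lines = []
--     in_error = False
--
--     for line in lines:
--         if "error TS" in line:
--             in_error = True
--             error_lines.append(line)
--         elif in_error and line.strip():
--             error_lines.append(line)
--         elif in_error and not line.strip():
--             in_error = False
--
--     if not error_lines:
--         # Return first 10 lines if no specific errors found
--         return "\n".join(lines[:10])
--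
--     # Return up to 20 error lines
--     return "\n".join(error_lines[:20])
-- ===== SOURCE B (Python) =====
-- def _extract_typescript_errors(output: str) -> str:
--     """Extract meaningful TypeScript errors from compiler output (group-then-scan)."""
--     lines = output.split("\n")
--
--     # Phase 1: partition into maximal runs of non-blank lines.
--     runs = []
--     cur = []
--     for line in lines:
--         if line.strip():
--             cur.append(line)
--         else:
--             if cur:
--                 runs.append(cur)
--             cur = []
--     if cur:
--         runs.append(cur)
--
--     # Phase 2: in each run, emit everything from the first 'error TS' line on.
--     error_lines = []
--     for run in runs:
--         for i, line in enumerate(run):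
--             if "error TS" in line:
--                 error_lines.extend(run[i:])
--                 break
--
--     if not error_lines:
--         return "\n".join(lines[:10])
--     return "\n".join(error_lines[:20])
-- ===== Notes on version B (the rewrite author's own statement) =====
-- stated objective: alternative
-- what changed: Replaces A's single-pass in_error state machine with a two-phase group-then-scan decomposition: first partition the lines into maximal blank-separated runs, then emit each run from its first 'error TS' line onward.
import Mathlib
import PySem

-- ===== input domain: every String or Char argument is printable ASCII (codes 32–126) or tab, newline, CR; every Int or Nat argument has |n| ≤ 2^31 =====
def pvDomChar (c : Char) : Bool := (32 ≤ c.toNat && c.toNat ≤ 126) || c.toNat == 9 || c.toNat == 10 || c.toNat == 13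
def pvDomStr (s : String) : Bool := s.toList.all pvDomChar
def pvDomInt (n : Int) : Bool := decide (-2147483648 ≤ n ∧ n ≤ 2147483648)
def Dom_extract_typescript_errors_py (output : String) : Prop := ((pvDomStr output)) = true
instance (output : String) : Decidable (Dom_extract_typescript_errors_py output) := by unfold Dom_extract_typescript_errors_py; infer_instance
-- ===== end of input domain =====

-- B replaces A's flat in_error state machine by a group-then-scan decomposition
-- (partition into blank-separated runs, then emit each run from its first 'error TS' line);
-- objective: alternative (same cost), return value only.

-- ===== PORT A =====
-- the for-loop of A over `lines`, state = (error_lines, in_error)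
def pvLoopA (lines : List String) (error_lines : List String) (in_error : Bool) : List String :=
  match lines with
  | [] => error_lines
  | line :: rest =>
    if PySem.Str.isIn "error TS" line then
      pvLoopA rest (error_lines ++ [line]) true
    else if in_error && !(PySem.Str.strip line == "") then
      pvLoopA rest (error_lines ++ [line]) in_error
    else if in_error && (PySem.Str.strip line == "") then
      pvLoopA rest error_lines false
    else
      pvLoopA rest error_lines in_error

def extract_typescript_errors_py (output : String) : String :=
  let lines := (PySem.Str.split? output "\n").getD []
  let error_lines := pvLoopA lines [] false
  if error_lines = [] then
    PySem.Str.join "\n" (PySem.List.slice lines none (some 10))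
  else
    PySem.Str.join "\n" (PySem.List.slice error_lines none (some 20))

-- ===== PORT B =====
-- Phase 1 of B: partition `lines` into maximal runs of non-blank lines (state = cur, runs)
def pvRuns (lines : List String) (cur : List String) (runs : List (List String)) :
    List (List String) :=
  match lines with
  | [] => if cur = [] then runs else runs ++ [cur]
  | line :: rest =>
    if !(PySem.Str.strip line == "") then
      pvRuns rest (cur ++ [line]) runs
    else if cur = [] then
      pvRuns rest [] runs
    else
      pvRuns rest [] (runs ++ [cur])

-- Phase 2 inner loop of B: `for i, line in enumerate(run): if "error TS" in line: run[i:]; break`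
def pvScan (run : List String) : List String :=
  match run with
  | [] => []
  | line :: rest => if PySem.Str.isIn "error TS" line then line :: rest else pvScan rest

def extract_typescript_errors_py_alt (output : String) : String :=
  let lines := (PySem.Str.split? output "\n").getD []
  let runs := pvRuns lines [] []
  let error_lines := runs.foldl (fun acc run => acc ++ pvScan run) []
  if error_lines = [] then
    PySem.Str.join "\n" (PySem.List.slice lines none (some 10))
  else
    PySem.Str.join "\n" (PySem.List.slice error_lines none (some 20))

-- ===== PRECONDITION & SPEC =====
def Spec_extract_typescript_errors_py (output : String) (out : String) : Prop := out = extract_typescript_errors_py_alt output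
instance (output : String) (out : String) : Decidable (Spec_extract_typescript_errors_py output out) := by unfold Spec_extract_typescript_errors_py; infer_instance

-- ===== CLAIM (what is proved, stated in full; the proofs are below) =====
def Claim_equal_extract_typescript_errors_py : Prop := ∀ (output : String), Dom_extract_typescript_errors_py output → Spec_extract_typescript_errors_py output (extract_typescript_errors_py output)

-- ===== LEMMAS AND PROOFS =====

-- A line containing "error TS" is not blank (its 'e' is not whitespace)
theorem pv_ts_not_blank (l : String) (h : PySem.Str.isIn "error TS" l = true) :
    (PySem.Str.strip l == "") = false := by
  rw [PySem.Str.isIn_iff_infix] at h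
  by_contra hb
  simp only [Bool.not_eq_false, beq_iff_eq] at hb
  -- strip l = "" → all chars whitespace
  have hall : ∀ c ∈ l.toList, PySem.Chars.isspace c = true := by
    intro c hc
    have hnil : PySem.Chars.strip l.toList = [] := by
      have := congrArg String.toList hb
      simpa [PySem.Str.strip] using this
    unfold PySem.Chars.strip PySem.Chars.rstrip PySem.Chars.lstrip at hnil
    have h2 : List.dropWhile PySem.Chars.isspace (List.dropWhile PySem.Chars.isspace l.toList).reverse = [] :=
      List.reverse_eq_nil_iff.mp hnil
    have h3 := List.dropWhile_eq_nil_iff.mp h2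
    have : c ∈ List.takeWhile PySem.Chars.isspace l.toList ∨ c ∈ List.dropWhile PySem.Chars.isspace l.toList := by
      rw [← List.mem_append, List.takeWhile_append_dropWhile]; exact hc
    rcases this with h4 | h4
    · exact List.mem_takeWhile_imp h4
    · exact h3 c (List.mem_reverse.mpr h4)
  have he : 'e' ∈ l.toList := by
    have := h.sublist.mem (a := 'e')
    apply this; decide
  have := hall 'e' he
  simp [PySem.Chars.isspace] at this

-- accumulator laws for the two loops
theorem pvLoopA_acc (lines : List String) (acc : List String) (b : Bool) :
    pvLoopA lines acc b = acc ++ pvLoopA lines [] b := by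
  induction lines generalizing acc b with
  | nil => simp [pvLoopA]
  | cons l rest ih =>
    simp only [pvLoopA]
    split_ifs with h1 h2 h3
    · rw [ih (acc ++ [l]), ih ([] ++ [l])]; simp
    · rw [ih (acc ++ [l]), ih ([] ++ [l])]; simp
    · rw [ih acc]
    · rw [ih acc]

theorem pvRuns_acc (lines cur : List String) (runs : List (List String)) :
    pvRuns lines cur runs = runs ++ pvRuns lines cur [] := by
  induction lines generalizing cur runs with
  | nil => simp [pvRuns]; split_ifs <;> simp
  | cons l rest ih =>
    simp only [pvRuns]
    split_ifs with h1 h2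
    · rw [ih (cur ++ [l]) runs]
    · rw [ih [] runs]
    · rw [ih [] (runs ++ [cur]), ih [] ([] ++ [cur])]; simp

theorem pv_fold_scan (rs : List (List String)) (acc : List String) :
    rs.foldl (fun a r => a ++ pvScan r) acc = acc ++ rs.flatMap pvScan := by
  induction rs generalizing acc with
  | nil => simp
  | cons r rs ih => simp [List.foldl_cons, ih, List.flatMap_cons]

-- pvScan over a run extended by one non-blank line
theorem pvScan_append_singleton (cur : List String) (l : String) :
    pvScan (cur ++ [l]) =
      if cur.any (fun x => PySem.Str.isIn "error TS" x) then pvScan cur ++ [l]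
      else if PySem.Str.isIn "error TS" l then [l] else [] := by
  induction cur with
  | nil => simp [pvScan]
  | cons c cur ih =>
    simp only [List.cons_append, pvScan, List.any_cons]
    by_cases hc : PySem.Str.isIn "error TS" c = true
    · simp only [hc, Bool.true_or, if_true, List.cons_append]
    · simp only [Bool.not_eq_true] at hc
      simp only [hc, Bool.false_or, Bool.false_eq_true, if_false, ih]

theorem pvScan_nil_of_no_ts (cur : List String)
    (h : cur.any (fun x => PySem.Str.isIn "error TS" x) = false) : pvScan cur = [] := by
  induction cur with
  | nil => rfl
  | cons c cur ih =>
    simp only [List.any_cons, Bool.or_eq_false_iff] at h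
    simp only [pvScan, h.1, Bool.false_eq_true, if_false]
    exact ih h.2

-- main bridge: B's run processing equals A's state machine (state = 'cur run so far')
theorem pv_main (lines : List String) (cur : List String) :
    (pvRuns lines cur []).flatMap pvScan =
      pvScan cur ++ pvLoopA lines [] (cur.any (fun x => PySem.Str.isIn "error TS" x)) := by
  induction lines generalizing cur with
  | nil =>
    simp only [pvRuns, pvLoopA]
    split_ifs with h
    · subst h; simp [pvScan]
    · simp [pvScan]
  | cons l rest ih =>
    simp only [pvRuns, pvLoopA]
    by_cases hts : PySem.Str.isIn "error TS" l = true
    · -- line contains "error TS": it is not blank, run continues, A starts/stays emitting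
      have hnb := pv_ts_not_blank l hts
      simp only [hts, if_true, hnb, Bool.not_false, if_true]
      rw [ih (cur ++ [l]), pvScan_append_singleton, pvLoopA_acc rest ([] ++ [l]) true]
      simp only [List.any_append, List.any_cons, List.any_nil, hts, Bool.true_or, Bool.or_false,
        Bool.or_true, List.nil_append]
      by_cases hc : cur.any (fun x => PySem.Str.isIn "error TS" x) = true
      · simp only [hc, if_true, List.append_assoc]
      · simp only [Bool.not_eq_true] at hc
        simp only [hc, Bool.false_eq_true, if_false, if_true,
          pvScan_nil_of_no_ts cur hc, List.nil_append]
    · simp only [Bool.not_eq_true] at hts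
      simp only [hts, Bool.false_eq_true, if_false]
      by_cases hb : (PySem.Str.strip l == "") = true
      · -- blank line: the run (if any) closes, A stops emitting
        simp only [hb, Bool.not_true, Bool.false_eq_true, if_false, Bool.and_false, Bool.and_true]
        by_cases hc0 : cur = []
        · subst hc0
          simp only [if_true, List.any_nil, Bool.false_eq_true, if_false]
          rw [ih []]
          rfl
        · simp only [hc0, if_false]
          rw [pvRuns_acc rest [] ([] ++ [cur])]
          simp only [List.nil_append, List.flatMap_append, List.flatMap_cons, List.flatMap_nil]
          rw [ih []]
          simp only [List.append_nil, List.any_nil, pvScan]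
          by_cases hc : cur.any (fun x => PySem.Str.isIn "error TS" x) = true
          · simp only [hc, if_true, List.nil_append]
          · simp only [Bool.not_eq_true] at hc
            simp only [hc, Bool.false_eq_true, if_false, pvScan_nil_of_no_ts cur hc,
              List.nil_append]
      · -- non-blank line without "error TS": run continues, A emits iff already in_error
        simp only [Bool.not_eq_true] at hb
        simp only [hb, Bool.not_false, if_true, Bool.and_true, Bool.and_false, Bool.false_eq_true,
          if_false]
        rw [ih (cur ++ [l]), pvScan_append_singleton]
        simp only [List.any_append, List.any_cons, List.any_nil, hts, Bool.false_eq_true, if_false,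
          Bool.or_false]
        by_cases hc : cur.any (fun x => PySem.Str.isIn "error TS" x) = true
        · rw [pvLoopA_acc rest ([] ++ [l])]
          simp only [hc, if_true, List.nil_append, List.append_assoc]
        · simp only [Bool.not_eq_true] at hc
          simp only [hc, Bool.false_eq_true, if_false, pvScan_nil_of_no_ts cur hc,
            List.nil_append]

-- ===== VERDICT (by name: the statement is the Claim_ definition above) =====
theorem extract_typescript_errors_py_spec : Claim_equal_extract_typescript_errors_py := by
  intro output _
  have h := pv_main ((PySem.Str.split? output "\n").getD []) []
  simp only [pvScan, List.any_nil, Bool.false_eq_true, if_false, List.nil_append] at h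
  show extract_typescript_errors_py output = extract_typescript_errors_py_alt output
  simp only [extract_typescript_errors_py, extract_typescript_errors_py_alt,
    pv_fold_scan, List.nil_append, h]
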